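-- pv_equiv track=rewrite | github.com/H1d3r/Responder | servers/DNS.py | get_srv_port
-- ===== SOURCE A (Python) =====
-- def get_srv_port(query_name):
-- 	"""
-- 	Determine the correct port for SRV record responses based on service name.
--
-- 	SRV query format: _service._protocol.name
-- 	Examples:
-- 	  _ldap._tcp.dc._msdcs.domain.local → 389
-- 	  _kerberos._tcp.domain.local → 88
-- 	  _gc._tcp.domain.local → 3268
--
-- 	Returns appropriate port for the service, defaults to 445 (SMB) if unknown.
-- 	"""
-- 	query_lower = query_name.lower()
--
-- 	# Service to port mapping
-- 	# Format: (service_pattern, port)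
-- 	srv_ports = [
-- 		# LDAP services
-- 		('_ldap._tcp', 389),
-- 		('_ldap._udp', 389),
-- 		('_ldaps._tcp', 636),
--
-- 		# Kerberos services
-- 		('_kerberos._tcp', 88),
-- 		('_kerberos._udp', 88),
-- 		('_kerberos-master._tcp', 88),
-- 		('_kerberos-master._udp', 88),
-- 		('_kpasswd._tcp', 464),
-- 		('_kpasswd._udp', 464),
-- 		('_kerberos-adm._tcp', 749),
--
-- 		# Global Catalog (Active Directory)
-- 		('_gc._tcp', 3268),
-- 		('_gc._ssl._tcp', 3269),
--
-- 		# Web services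
-- 		('_http._tcp', 80),
-- 		('_https._tcp', 443),
-- 		('_http._ssl._tcp', 443),
--
-- 		# Email services
-- 		('_smtp._tcp', 25),
-- 		('_submission._tcp', 587),
-- 		('_imap._tcp', 143),
-- 		('_imaps._tcp', 993),
-- 		('_pop3._tcp', 110),
-- 		('_pop3s._tcp', 995),
--
-- 		# File/Remote services
-- 		('_smb._tcp', 445),
-- 		('_cifs._tcp', 445),
-- 		('_ftp._tcp', 21),
-- 		('_sftp._tcp', 22),
-- 		('_ssh._tcp', 22),
-- 		('_telnet._tcp', 23),
-- 		('_rdp._tcp', 3389),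
-- 		('_ms-wbt-server._tcp', 3389),  # RDP
--
-- 		# Windows services
-- 		('_winrm._tcp', 5985),
-- 		('_winrm-ssl._tcp', 5986),
-- 		('_wsman._tcp', 5985),
-- 		('_ntp._udp', 123),
--
-- 		# Database services
-- 		('_mssql._tcp', 1433),
-- 		('_mysql._tcp', 3306),
-- 		('_postgresql._tcp', 5432),
-- 		('_oracle._tcp', 1521),
--
-- 		# SIP/VoIP
-- 		('_sip._tcp', 5060),
-- 		('_sip._udp', 5060),
-- 		('_sips._tcp', 5061),
--
-- 		# XMPP/Jabber
-- 		('_xmpp-client._tcp', 5222),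
-- 		('_xmpp-server._tcp', 5269),
--
-- 		# Other
-- 		('_finger._tcp', 79),
-- 		('_ipp._tcp', 631),  # Internet Printing Protocol
-- 	]
--
-- 	# Check each pattern
-- 	for pattern, port in srv_ports:
-- 		if query_lower.startswith(pattern):
-- 			return port
--
-- 	# Default to SMB port for unknown services
-- 	# This is a reasonable default for credential capture
-- 	return 445
-- ===== SOURCE B (Python) =====
-- def get_srv_port(query_name):
--     """Port of SRV service prefix -> port, via a dict keyed by pattern plus the
--     set of distinct pattern lengths (no pattern is a prefix of another, so at
--     most one pattern can match and scan order is irrelevant)."""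
--     query_lower = query_name.lower()
--
--     table = {
--         '_cifs._tcp': 445,
--         '_finger._tcp': 79,
--         '_ftp._tcp': 21,
--         '_gc._ssl._tcp': 3269,
--         '_gc._tcp': 3268,
--         '_http._ssl._tcp': 443,
--         '_http._tcp': 80,
--         '_https._tcp': 443,
--         '_imap._tcp': 143,
--         '_imaps._tcp': 993,
--         '_ipp._tcp': 631,
--         '_kerberos-adm._tcp': 749,
--         '_kerberos-master._tcp': 88,
--         '_kerberos-master._udp': 88,
--         '_kerberos._tcp': 88,
--         '_kerberos._udp': 88,
--         '_kpasswd._tcp': 464,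
--         '_kpasswd._udp': 464,
--         '_ldap._tcp': 389,
--         '_ldap._udp': 389,
--         '_ldaps._tcp': 636,
--         '_ms-wbt-server._tcp': 3389,
--         '_mssql._tcp': 1433,
--         '_mysql._tcp': 3306,
--         '_ntp._udp': 123,
--         '_oracle._tcp': 1521,
--         '_pop3._tcp': 110,
--         '_pop3s._tcp': 995,
--         '_postgresql._tcp': 5432,
--         '_rdp._tcp': 3389,
--         '_sftp._tcp': 22,
--         '_sip._tcp': 5060,
--         '_sip._udp': 5060,
--         '_sips._tcp': 5061,
--         '_smb._tcp': 445,
--         '_smtp._tcp': 25,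
--         '_ssh._tcp': 22,
--         '_submission._tcp': 587,
--         '_telnet._tcp': 23,
--         '_winrm-ssl._tcp': 5986,
--         '_winrm._tcp': 5985,
--         '_wsman._tcp': 5985,
--         '_xmpp-client._tcp': 5222,
--         '_xmpp-server._tcp': 5269,
--     }
--
--     lengths = list(dict.fromkeys(len(p) for p in table))
--     for L in lengths:
--         prefix = query_lower[:L]
--         if prefix in table:
--             return table[prefix]
--     return 445
-- ===== Notes on version B (the rewrite author's own statement) =====
-- stated objective: idiomatic
-- what changed: Replaces A's ordered linear scan of 44 startswith tests by a dict keyed by pattern plus a loop over the distinct pattern lengths (query_lower[:L] looked up in the dict), correct because no pattern is a prefix of another so at most one pattern can match.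
import Mathlib
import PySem

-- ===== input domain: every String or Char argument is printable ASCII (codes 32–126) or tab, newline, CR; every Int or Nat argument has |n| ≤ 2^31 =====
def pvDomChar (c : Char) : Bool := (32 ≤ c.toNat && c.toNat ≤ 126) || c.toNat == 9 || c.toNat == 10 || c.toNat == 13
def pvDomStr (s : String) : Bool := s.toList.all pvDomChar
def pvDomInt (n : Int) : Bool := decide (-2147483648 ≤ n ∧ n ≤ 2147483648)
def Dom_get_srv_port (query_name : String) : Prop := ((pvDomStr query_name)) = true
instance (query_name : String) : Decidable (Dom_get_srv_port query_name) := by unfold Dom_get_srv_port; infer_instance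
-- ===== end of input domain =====

set_option maxRecDepth 100000


-- B replaces A's ordered linear scan of 44 startswith tests by a dict keyed by pattern
-- plus the distinct pattern lengths (at most one pattern can match); objective: idiomatic.

-- ===== PORT A =====
-- A's literal pattern/port list, in A's order.
def srvPortsA : List (String × Int) := [
  ("_ldap._tcp", 389), ("_ldap._udp", 389), ("_ldaps._tcp", 636),
  ("_kerberos._tcp", 88), ("_kerberos._udp", 88), ("_kerberos-master._tcp", 88),
  ("_kerberos-master._udp", 88), ("_kpasswd._tcp", 464), ("_kpasswd._udp", 464),
  ("_kerberos-adm._tcp", 749),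
  ("_gc._tcp", 3268), ("_gc._ssl._tcp", 3269),
  ("_http._tcp", 80), ("_https._tcp", 443), ("_http._ssl._tcp", 443),
  ("_smtp._tcp", 25), ("_submission._tcp", 587), ("_imap._tcp", 143),
  ("_imaps._tcp", 993), ("_pop3._tcp", 110), ("_pop3s._tcp", 995),
  ("_smb._tcp", 445), ("_cifs._tcp", 445), ("_ftp._tcp", 21), ("_sftp._tcp", 22),
  ("_ssh._tcp", 22), ("_telnet._tcp", 23), ("_rdp._tcp", 3389),
  ("_ms-wbt-server._tcp", 3389),
  ("_winrm._tcp", 5985), ("_winrm-ssl._tcp", 5986), ("_wsman._tcp", 5985),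
  ("_ntp._udp", 123),
  ("_mssql._tcp", 1433), ("_mysql._tcp", 3306), ("_postgresql._tcp", 5432),
  ("_oracle._tcp", 1521),
  ("_sip._tcp", 5060), ("_sip._udp", 5060), ("_sips._tcp", 5061),
  ("_xmpp-client._tcp", 5222), ("_xmpp-server._tcp", 5269),
  ("_finger._tcp", 79), ("_ipp._tcp", 631)]

-- A's for-loop: first pattern the lowered query starts with wins; default 445.
def findPortA (ql : String) : List (String × Int) → Int
  | [] => 445
  | (p, port) :: rest => if PySem.Str.startswith ql p then port else findPortA ql rest

def get_srv_port (query_name : String) : Int :=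
  findPortA (PySem.Str.lower query_name) srvPortsA

-- ===== PORT B =====
-- B's dict literal (pattern → port), written sorted by pattern as in Source B.
def srvPairsB : List (String × Int) := [
  ("_cifs._tcp", 445), ("_finger._tcp", 79), ("_ftp._tcp", 21),
  ("_gc._ssl._tcp", 3269), ("_gc._tcp", 3268),
  ("_http._ssl._tcp", 443), ("_http._tcp", 80), ("_https._tcp", 443),
  ("_imap._tcp", 143), ("_imaps._tcp", 993), ("_ipp._tcp", 631),
  ("_kerberos-adm._tcp", 749), ("_kerberos-master._tcp", 88),
  ("_kerberos-master._udp", 88), ("_kerberos._tcp", 88), ("_kerberos._udp", 88),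
  ("_kpasswd._tcp", 464), ("_kpasswd._udp", 464),
  ("_ldap._tcp", 389), ("_ldap._udp", 389), ("_ldaps._tcp", 636),
  ("_ms-wbt-server._tcp", 3389), ("_mssql._tcp", 1433), ("_mysql._tcp", 3306),
  ("_ntp._udp", 123), ("_oracle._tcp", 1521),
  ("_pop3._tcp", 110), ("_pop3s._tcp", 995), ("_postgresql._tcp", 5432),
  ("_rdp._tcp", 3389), ("_sftp._tcp", 22),
  ("_sip._tcp", 5060), ("_sip._udp", 5060), ("_sips._tcp", 5061),
  ("_smb._tcp", 445), ("_smtp._tcp", 25), ("_ssh._tcp", 22),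
  ("_submission._tcp", 587), ("_telnet._tcp", 23),
  ("_winrm-ssl._tcp", 5986), ("_winrm._tcp", 5985), ("_wsman._tcp", 5985),
  ("_xmpp-client._tcp", 5222), ("_xmpp-server._tcp", 5269)]

def srvTableB : PySem.Dict String Int := PySem.Dict.ofList srvPairsB

-- lengths = list(dict.fromkeys(len(p) for p in table))
def srvLensB : List Int := PySem.List.dedup (srvTableB.keys.map PySem.Str.len)

-- B's loop over the distinct pattern lengths: 'prefix in table' / 'table[prefix]'.
def findPortB (ql : String) : List Int → Int
  | [] => 445
  | L :: rest =>
    match srvTableB.get? (PySem.Str.slice ql none (some L)) with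
    | some port => port
    | none => findPortB ql rest

def get_srv_port_alt (query_name : String) : Int :=
  findPortB (PySem.Str.lower query_name) srvLensB

-- ===== PRECONDITION & SPEC =====
def Spec_get_srv_port (query_name : String) (out : Int) : Prop := out = get_srv_port_alt query_name
instance (query_name : String) (out : Int) : Decidable (Spec_get_srv_port query_name out) := by unfold Spec_get_srv_port; infer_instance

-- ===== CLAIM (what is proved, stated in full; the proofs are below) =====
def Claim_equal_get_srv_port : Prop := ∀ (query_name : String), Dom_get_srv_port query_name → Spec_get_srv_port query_name (get_srv_port query_name)

-- ===== LEMMAS AND PROOFS =====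

-- No pattern of A's list is a (string-)prefix of a different entry's pattern.
theorem srv_no_prefix : ∀ a ∈ srvPortsA, ∀ b ∈ srvPortsA,
    a.1.toList <+: b.1.toList → a = b := by decide

theorem srv_memAB : ∀ pr ∈ srvPortsA, pr ∈ srvPairsB := by decide
theorem srv_memBA : ∀ pr ∈ srvPairsB, pr ∈ srvPortsA := by decide
theorem srv_items : srvTableB.items = srvPairsB := by decide
theorem srv_lens_nonneg : ∀ L ∈ srvLensB, 0 ≤ L := by decide

theorem srv_get?_iff (k : String) (v : Int) :
    srvTableB.get? k = some v ↔ (k, v) ∈ srvPairsB := by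
  have h := PySem.Dict.get?_eq_some_iff_mem_items srvTableB k v
    (PySem.Dict.nodup_keys_ofList srvPairsB)
  rwa [srv_items] at h

theorem sw_iff (s p : String) :
    PySem.Str.startswith s p = true ↔ p.toList <+: s.toList := by
  rw [PySem.Str.startswith_eq]; exact PySem.Chars.startswith_iff _ _

-- the slice ql[:L] for 0 ≤ L, on the list side
theorem slice_toList (ql : String) (L : Int) (hL : 0 ≤ L) :
    (PySem.Str.slice ql none (some L)).toList = ql.toList.take L.toNat := by
  rw [PySem.Str.toList_slice, PySem.Chars.slice_eq_listSlice, PySem.List.slice_to _ hL]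

-- at most one pattern matches ql
theorem srv_unique (ql : String) : ∀ a ∈ srvPortsA, ∀ b ∈ srvPortsA,
    PySem.Str.startswith ql a.1 = true → PySem.Str.startswith ql b.1 = true → a = b := by
  intro a ha b hb hsa hsb
  rw [sw_iff] at hsa hsb
  rcases List.prefix_or_prefix_of_prefix hsa hsb with h | h
  · exact srv_no_prefix a ha b hb h
  · exact (srv_no_prefix b hb a ha h).symm

-- a successful lookup at some length yields a matching pattern entry
theorem srv_lookup_match (ql : String) (L : Int) (hL : 0 ≤ L) (v : Int)
    (h : srvTableB.get? (PySem.Str.slice ql none (some L)) = some v) :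
    (PySem.Str.slice ql none (some L), v) ∈ srvPortsA ∧
      PySem.Str.startswith ql (PySem.Str.slice ql none (some L)) = true := by
  have hmem := srv_memBA _ ((srv_get?_iff _ _).mp h)
  refine ⟨hmem, ?_⟩
  rw [sw_iff, slice_toList ql L hL]
  exact List.take_prefix _ _

theorem findPortA_none (ql : String) (l : List (String × Int))
    (h : ∀ pr ∈ l, PySem.Str.startswith ql pr.1 = false) : findPortA ql l = 445 := by
  induction l with
  | nil => rfl
  | cons hd tl ih =>
    obtain ⟨p, port⟩ := hd
    simp only [findPortA, h (p, port) List.mem_cons_self]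
    exact ih (fun pr hpr => h pr (List.mem_cons_of_mem _ hpr))

theorem findPortA_found (ql : String) (l : List (String × Int)) (p : String) (v : Int)
    (hm : (p, v) ∈ l) (hs : PySem.Str.startswith ql p = true)
    (hu : ∀ pr ∈ l, PySem.Str.startswith ql pr.1 = true → pr = (p, v)) :
    findPortA ql l = v := by
  induction l with
  | nil => cases hm
  | cons hd tl ih =>
    obtain ⟨a, b⟩ := hd
    by_cases hsa : PySem.Str.startswith ql a = true
    · have := hu (a, b) List.mem_cons_self hsa
      simp only [findPortA, hsa, if_true]
      exact congrArg Prod.snd this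
    · simp only [findPortA, if_neg hsa]
      have hmt : (p, v) ∈ tl := by
        rcases List.mem_cons.mp hm with heq | h
        · exfalso; apply hsa; rw [show a = p from congrArg Prod.fst heq.symm] at *; exact hs
        · exact h
      exact ih hmt (fun pr hpr hspr => hu pr (List.mem_cons_of_mem _ hpr) hspr)

theorem findPortB_none (ql : String) (l : List Int)
    (h : ∀ L ∈ l, srvTableB.get? (PySem.Str.slice ql none (some L)) = none) :
    findPortB ql l = 445 := by
  induction l with
  | nil => rfl
  | cons hd tl ih =>
    simp only [findPortB, h hd List.mem_cons_self]
    exact ih (fun L hL => h L (List.mem_cons_of_mem _ hL))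

theorem findPortB_found (ql : String) (l : List Int) (L : Int) (v : Int)
    (hm : L ∈ l)
    (hs : srvTableB.get? (PySem.Str.slice ql none (some L)) = some v)
    (hu : ∀ L' ∈ l, ∀ v', srvTableB.get? (PySem.Str.slice ql none (some L')) = some v' → v' = v) :
    findPortB ql l = v := by
  induction l with
  | nil => cases hm
  | cons hd tl ih =>
    cases hg : srvTableB.get? (PySem.Str.slice ql none (some hd)) with
    | some w =>
      simp only [findPortB, hg]
      exact hu hd List.mem_cons_self w hg
    | none =>
      simp only [findPortB, hg]
      have hmt : L ∈ tl := by
        rcases List.mem_cons.mp hm with heq | h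
        · exfalso; rw [heq] at hs; rw [hg] at hs; cases hs
        · exact h
      exact ih hmt (fun L' hL' v' hv' => hu L' (List.mem_cons_of_mem _ hL') v' hv')

-- a matching pattern's length is among B's distinct lengths, and its slice equals the pattern
theorem srv_len_mem (p : String) (v : Int) (hm : (p, v) ∈ srvPortsA) :
    PySem.Str.len p ∈ srvLensB := by
  have hB : (p, v) ∈ srvPairsB := srv_memAB _ hm
  have hk : p ∈ srvTableB.keys := by
    have : p ∈ srvPairsB.map Prod.fst := List.mem_map_of_mem hB
    simpa [PySem.Dict.keys, srv_items] using this
  unfold srvLensB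
  rw [PySem.List.dedup_eq_ofList]
  exact (PySem.Set.mem_ofList _ _).mpr (List.mem_map_of_mem hk)

theorem srv_slice_eq (ql p : String) (hs : PySem.Str.startswith ql p = true) :
    PySem.Str.slice ql none (some (PySem.Str.len p)) = p := by
  apply String.toList_inj.mp
  rw [PySem.Str.len_eq, slice_toList ql _ (by positivity)]
  have := (sw_iff ql p).mp hs
  rw [List.prefix_iff_eq_take] at this
  simpa using this.symm

-- the core equivalence, for an arbitrary lowered query
theorem findPort_eq (ql : String) : findPortA ql srvPortsA = findPortB ql srvLensB := by
  by_cases h : ∃ pr ∈ srvPortsA, PySem.Str.startswith ql pr.1 = true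
  · obtain ⟨⟨p, v⟩, hm, hs⟩ := h
    have hu := srv_unique ql
    have hA : findPortA ql srvPortsA = v :=
      findPortA_found ql _ p v hm hs
        (fun pr hpr hspr => hu pr hpr (p, v) hm hspr hs)
    have hsl : PySem.Str.slice ql none (some (PySem.Str.len p)) = p := srv_slice_eq ql p hs
    have hg : srvTableB.get? (PySem.Str.slice ql none (some (PySem.Str.len p))) = some v := by
      rw [hsl]; exact (srv_get?_iff _ _).mpr (srv_memAB _ hm)
    have hB : findPortB ql srvLensB = v := by
      apply findPortB_found ql _ (PySem.Str.len p) v (srv_len_mem p v hm) hg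
      intro L' hL' v' hv'
      obtain ⟨hmem', hsw'⟩ := srv_lookup_match ql L' (srv_lens_nonneg L' hL') v' hv'
      have := hu _ hmem' (p, v) hm hsw' hs
      exact congrArg Prod.snd this
    rw [hA, hB]
  · push Not at h
    have hA : findPortA ql srvPortsA = 445 :=
      findPortA_none ql _ (fun pr hpr => by simpa using h pr hpr)
    have hB : findPortB ql srvLensB = 445 := by
      apply findPortB_none
      intro L hL
      cases hg : srvTableB.get? (PySem.Str.slice ql none (some L)) with
      | none => rfl
      | some v =>
        obtain ⟨hmem, hsw⟩ := srv_lookup_match ql L (srv_lens_nonneg L hL) v hg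
        exact absurd hsw (by simpa using h _ hmem)
    rw [hA, hB]

-- ===== VERDICT (by name: the statement is the Claim_ definition above) =====
theorem get_srv_port_spec : Claim_equal_get_srv_port := by
  intro query_name _
  unfold Spec_get_srv_port get_srv_port get_srv_port_alt
  exact findPort_eq (PySem.Str.lower query_name)
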